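-- pv_equiv track=rewrite | github.com/ZckFreedom/Mathworks | db_sqence/k_ary_dB.py | g_set
-- ===== SOURCE A (Python) =====
-- def if_nk(sequence_list, ary):
-- 	if len(sequence_list) == 0:
-- 		return False
-- 	n = len(sequence_list)
-- 	degree = ary ** (n-1)
-- 	value1 = 0
-- 	for i in range(n):
-- 		value1 += sequence_list[i] * (ary ** (n-i-1))
-- 	a1 = value1//degree
-- 	value2 = (ary * value1 + a1) % (ary ** n)
-- 	while value2 != value1:
-- 		if value2 < value1:
-- 			return False
-- 		a1 = value2 // degree
-- 		value2 = (ary * value2 + a1) % (ary ** n)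
-- 	return True
--
-- def g_set(sequence, ary):
-- 	if sequence[0] != 0:
-- 		return []
-- 	t = ary - 1
-- 	new_state = sequence[1:] + [t]
-- 	r_list = []
-- 	if not if_nk(new_state, ary):
-- 		return []
-- 	r_list.append(t)
-- 	while t > 1:
-- 		t = t - 1
-- 		new_state = sequence[1:] + [t]
-- 		if if_nk(new_state, ary):
-- 			r_list.append(t)
-- 		else:
-- 			r_list.reverse()
-- 			return r_list
-- 	r_list.reverse()
-- 	return r_list
-- ===== SOURCE B (Python) =====
-- def _is_least_rotation(state):
--     # state is a least rotation iff no rotation of it compares (lexicographically) smaller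
--     n = len(state)
--     return all(state <= state[k:] + state[:k] for k in range(1, n))
--
-- def g_set(sequence, ary):
--     if sequence[0] != 0:
--         return []
--     body = sequence[1:]
--     res = []
--     for t in range(ary - 1, 0, -1):
--         if not _is_least_rotation(body + [t]):
--             break
--         res.append(t)
--     res.reverse()
--     return res
-- ===== Notes on version B (the rewrite author's own statement) =====
-- stated objective: alternative
-- what changed: B replaces A's per-candidate bigint encoding (powers of ary, floor-division and modular rotation of an n-digit number, repeated for every rotation) by direct lexicographic comparison of the digit list with each of its rotations, so the necklace test uses list comparisons with early exit instead of arbitrary-precision arithmetic.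
-- outside the precondition, e.g. on g_set([0], 1): A returns [0], B returns []; on g_set([0], 0): A raises ZeroDivisionError, B returns []; on g_set([0, -1], 2): A does not finish within the time limit, B returns [1]
import Mathlib
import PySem

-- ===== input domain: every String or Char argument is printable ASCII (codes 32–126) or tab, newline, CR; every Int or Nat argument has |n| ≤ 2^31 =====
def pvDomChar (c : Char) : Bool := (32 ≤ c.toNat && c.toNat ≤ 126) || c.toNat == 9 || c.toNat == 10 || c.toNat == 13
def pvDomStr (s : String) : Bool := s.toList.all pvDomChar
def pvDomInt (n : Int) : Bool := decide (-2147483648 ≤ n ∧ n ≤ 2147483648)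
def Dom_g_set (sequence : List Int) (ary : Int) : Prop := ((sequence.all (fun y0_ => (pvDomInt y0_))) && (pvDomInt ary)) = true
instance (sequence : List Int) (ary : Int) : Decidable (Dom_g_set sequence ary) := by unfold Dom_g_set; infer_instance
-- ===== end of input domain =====

-- B replaces A's bigint rotation arithmetic in the de Bruijn necklace test by direct
-- lexicographic comparison of the digit list with its rotations (objective: alternative).


-- ===== PORT A =====
-- inner while-loop of if_nk; the fuel only makes the recursion total: under Pre_ the loop
-- terminates within `fuel = n` steps (outside Pre_ Python can diverge — those inputs are excluded)
def if_nk_loop (ary degree modn value1 : Int) (fuel : Nat) (value2 : Int) : Bool :=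
  if value2 = value1 then true
  else if value2 < value1 then false
  else
    match fuel with
    | 0 => false
    | Nat.succ f =>
      if_nk_loop ary degree modn value1 f
        (PySem.Int.mod (ary * value2 + PySem.Int.floordiv value2 degree) modn)

def if_nk (sequence_list : List Int) (ary : Int) : Bool :=
  if sequence_list.length = 0 then false
  else
    let n := sequence_list.length
    let degree := ary ^ (n - 1)
    -- for i in range(n): value1 += sequence_list[i] * ary**(n-i-1)   (i is always in range)
    let value1 := (List.range n).foldl (fun v i => v + sequence_list.getD i 0 * ary ^ (n - i - 1)) 0
    let a1 := PySem.Int.floordiv value1 degree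
    let value2 := PySem.Int.mod (ary * value1 + a1) (ary ^ n)
    if_nk_loop ary degree (ary ^ n) value1 n value2

-- while t > 1: t -= 1; test; append, or reverse and return at the first failure
def g_set_loopA (body : List Int) (ary : Int) (t : Int) (r : List Int) : List Int :=
  if h : 1 < t then
    if if_nk (body ++ [t - 1]) ary then g_set_loopA body ary (t - 1) (r ++ [t - 1])
    else r.reverse
  else r.reverse
termination_by t.toNat
decreasing_by omega

def g_set (sequence : List Int) (ary : Int) : List Int :=
  match PySem.List.pyGet? sequence 0 with
  | none => []          -- Python raises IndexError on the empty list; excluded by Pre_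
  | some h =>
    if h ≠ 0 then []
    else
      let t := ary - 1
      let body := PySem.List.slice sequence (some 1) none
      if if_nk (body ++ [t]) ary then g_set_loopA body ary t [t]
      else []

-- ===== PORT B =====
-- Python list `<=` (lexicographic comparison)
def lexLe : List Int → List Int → Bool
  | [], _ => true
  | _ :: _, [] => false
  | a :: xs, b :: ys => a < b || (a == b && lexLe xs ys)

-- all(state <= state[k:] + state[:k] for k in range(1, len(state)))
def isLeastRotation (state : List Int) : Bool :=
  (PySem.List.pyRange 1 (PySem.List.len state) 1).all
    (fun k => lexLe state (PySem.List.slice state (some k) none ++ PySem.List.slice state none (some k)))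

-- for t in range(ary-1, 0, -1): append while the test holds, break at the first failure
def g_set_loopB (body : List Int) : List Int → List Int → List Int
  | [], res => res
  | t :: ts, res =>
    if isLeastRotation (body ++ [t]) then g_set_loopB body ts (res ++ [t])
    else res

def g_set_alt (sequence : List Int) (ary : Int) : List Int :=
  match PySem.List.pyGet? sequence 0 with
  | none => []          -- Python raises IndexError on the empty list; excluded by Pre_
  | some h =>
    if h ≠ 0 then []
    else
      let body := PySem.List.slice sequence (some 1) none
      (g_set_loopB body (PySem.List.pyRange (ary - 1) 0 (-1)) []).reverse

-- ===== PRECONDITION & SPEC =====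
-- Pre_ excludes the empty list (A raises IndexError) and, only when sequence[0] == 0 so the
-- rotation loop actually runs, ary < 2 and tail digits outside [0, ary): there A raises
-- ZeroDivisionError (ary = 0) or can loop forever (negative ary, out-of-range digits such as
-- [0, -1]), and ary = 1 is the degenerate arity; when sequence[0] ≠ 0, A returns [] before
-- any arithmetic, so those inputs stay inside Pre_ with no restriction on ary or the digits.
def Pre_g_set (sequence : List Int) (ary : Int) : Prop :=
  sequence ≠ [] ∧ (sequence.headI ≠ 0 ∨ (2 ≤ ary ∧ ∀ x ∈ sequence.tail, 0 ≤ x ∧ x < ary))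
instance (sequence : List Int) (ary : Int) : Decidable (Pre_g_set sequence ary) := by
  unfold Pre_g_set; infer_instance

def pvWitness_g_set : List Int × Int := ([0, 1, 1], 2)

def Spec_g_set (sequence : List Int) (ary : Int) (out : List Int) : Prop := out = g_set_alt sequence ary
instance (sequence : List Int) (ary : Int) (out : List Int) : Decidable (Spec_g_set sequence ary out) := by unfold Spec_g_set; infer_instance

-- ===== CLAIM (what is proved, stated in full; the proofs are below) =====
def Claim_equal_g_set : Prop := ∀ (sequence : List Int) (ary : Int), Dom_g_set sequence ary → Pre_g_set sequence ary → Spec_g_set sequence ary (g_set sequence ary)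

-- ===== LEMMAS AND PROOFS =====

-- value of a digit list in base `ary` (Horner form)
def horner (ary : Int) (l : List Int) : Int := l.foldl (fun acc d => acc * ary + d) 0

-- all digits in [0, ary)
def InRange (ary : Int) (l : List Int) : Prop := ∀ x ∈ l, 0 ≤ x ∧ x < ary

-- l is ≤ (by value) every rotation of itself: what both necklace tests decide
def LeastRot (ary : Int) (l : List Int) : Prop :=
  ∀ k : Nat, 1 ≤ k → k ≤ l.length → horner ary l ≤ horner ary (l.rotate k)

theorem horner_acc (ary : Int) (l : List Int) (a : Int) :
    l.foldl (fun acc d => acc * ary + d) a = a * ary ^ l.length + horner ary l := by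
  induction l generalizing a with
  | nil => simp [horner]
  | cons d t ih =>
    simp only [List.foldl_cons, List.length_cons]
    rw [ih (a * ary + d)]
    have h2 : horner ary (d :: t) = d * ary ^ t.length + horner ary t := by
      unfold horner
      simp only [List.foldl_cons, zero_mul, zero_add]
      exact ih d
    rw [h2]
    ring

theorem horner_cons (ary d : Int) (l : List Int) :
    horner ary (d :: l) = d * ary ^ l.length + horner ary l := by
  unfold horner
  simp only [List.foldl_cons, zero_mul, zero_add]
  rw [horner_acc]
  rfl

theorem horner_append_singleton (ary d : Int) (l : List Int) :
    horner ary (l ++ [d]) = horner ary l * ary + d := by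
  simp [horner, List.foldl_append]

theorem horner_bounds (ary : Int) (hary : 0 < ary) (l : List Int) (hin : InRange ary l) :
    0 ≤ horner ary l ∧ horner ary l < ary ^ l.length := by
  induction l with
  | nil => simp [horner]
  | cons d t ih =>
    have hd := hin d (List.mem_cons_self ..)
    have ih' := ih (fun x hx => hin x (List.mem_cons_of_mem _ hx))
    have hp : (0:Int) < ary ^ t.length := pow_pos hary _
    rw [horner_cons]
    constructor
    · nlinarith [hd.1, ih'.1]
    · have : ary ^ (d :: t).length = ary * ary ^ t.length := by
        simp [pow_succ]; ring
      rw [this]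
      simp [List.getD_cons_succ]
      nlinarith [hd.2, ih'.2, hd.1, ih'.1]

theorem value1_eq_horner (ary : Int) (l : List Int) :
    (List.range l.length).foldl (fun v i => v + l.getD i 0 * ary ^ (l.length - i - 1)) 0
      = horner ary l := by
  induction l with
  | nil => simp [horner]
  | cons d t ih =>
    rw [List.length_cons, List.range_succ_eq_map, List.foldl_cons, List.foldl_map]
    have hfun : ∀ (v : Int) (i : Nat),
        v + (d :: t).getD (i+1) 0 * ary ^ (t.length + 1 - (i+1) - 1)
          = v + t.getD i 0 * ary ^ (t.length - i - 1) := by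
      intro v i
      have : t.length + 1 - (i+1) - 1 = t.length - i - 1 := by omega
      rw [this]
      simp [List.getD_cons_succ]
    calc (List.range t.length).foldl
            (fun v i => v + (d :: t).getD (i+1) 0 * ary ^ (t.length + 1 - (i+1) - 1))
            (0 + (d :: t).getD 0 0 * ary ^ (t.length + 1 - 0 - 1))
        = (List.range t.length).foldl (fun v i => v + t.getD i 0 * ary ^ (t.length - i - 1))
            (d * ary ^ t.length) := by
          congr 1
          · funext v i; exact hfun v i
          · simp
      _ = d * ary ^ t.length + horner ary t := by
          rw [PySem.List.foldl_add, ← ih, PySem.List.foldl_add, zero_add]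
      _ = horner ary (d :: t) := (horner_cons ary d t).symm

theorem block_lt (A hxs hys x y : Int) (hA : 0 < A) (hxs0 : 0 ≤ hxs) (hxsA : hxs < A)
    (hys0 : 0 ≤ hys) (hxy : x < y) : x * A + hxs < y * A + hys := by
  have h1 : x + 1 ≤ y := by omega
  have h2 : (x + 1) * A ≤ y * A := mul_le_mul_of_nonneg_right h1 (le_of_lt hA)
  have h3 : (x + 1) * A = x * A + A := by ring
  linarith

theorem lexLe_eq (ary : Int) (hary : 0 < ary) :
    ∀ (a b : List Int), InRange ary a → InRange ary b → a.length = b.length →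
      lexLe a b = decide (horner ary a ≤ horner ary b)
  | [], [], _, _, _ => by simp [lexLe, horner]
  | x :: xs, y :: ys, hina, hinb, hlen => by
    have hlen' : xs.length = ys.length := by simpa using hlen
    have hx := hina x (List.mem_cons_self ..)
    have hy := hinb y (List.mem_cons_self ..)
    have hbx := horner_bounds ary hary xs (fun z hz => hina z (List.mem_cons_of_mem _ hz))
    have hby := horner_bounds ary hary ys (fun z hz => hinb z (List.mem_cons_of_mem _ hz))
    have hpx : (0:Int) < ary ^ xs.length := pow_pos hary _
    rw [horner_cons, horner_cons, ← hlen']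
    have hby2 : horner ary ys < ary ^ xs.length := by rw [hlen']; exact hby.2
    rcases lt_trichotomy x y with h | h | h
    · have hle : x * ary ^ xs.length + horner ary xs ≤ y * ary ^ xs.length + horner ary ys :=
        le_of_lt (block_lt _ _ _ _ _ hpx hbx.1 hbx.2 hby.1 h)
      have hL : lexLe (x :: xs) (y :: ys) = true := by simp [lexLe, h]
      rw [hL, decide_eq_true hle]
    · subst h
      have hstep : lexLe (x :: xs) (x :: ys) = lexLe xs ys := by simp [lexLe]
      rw [hstep, lexLe_eq ary hary xs ys (fun z hz => hina z (List.mem_cons_of_mem _ hz))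
        (fun z hz => hinb z (List.mem_cons_of_mem _ hz)) hlen']
      have hiff : horner ary xs ≤ horner ary ys ↔
          x * ary ^ xs.length + horner ary xs ≤ x * ary ^ xs.length + horner ary ys := by
        constructor <;> intro h' <;> linarith
      exact decide_eq_decide.mpr hiff
    · have hgt : y * ary ^ xs.length + horner ary ys < x * ary ^ xs.length + horner ary xs :=
        block_lt _ _ _ _ _ hpx hby.1 hby2 hbx.1 h
      have h1 : ¬ (x < y) := by omega
      have h2 : ¬ (x = y) := by omega
      have hnle : ¬ (x * ary ^ xs.length + horner ary xs ≤ y * ary ^ xs.length + horner ary ys) :=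
        not_le.2 hgt
      have hF : lexLe (x :: xs) (y :: ys) = false := by simp [lexLe, h1, h2]
      rw [hF, decide_eq_false hnle]

theorem horner_inj (ary : Int) (hary : 0 < ary) :
    ∀ (a b : List Int), InRange ary a → InRange ary b → a.length = b.length →
      horner ary a = horner ary b → a = b
  | [], [], _, _, _, _ => rfl
  | x :: xs, y :: ys, hina, hinb, hlen, heq => by
    have hlen' : xs.length = ys.length := by simpa using hlen
    have hbx := horner_bounds ary hary xs (fun z hz => hina z (List.mem_cons_of_mem _ hz))
    have hby := horner_bounds ary hary ys (fun z hz => hinb z (List.mem_cons_of_mem _ hz))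
    have hpx : (0:Int) < ary ^ xs.length := pow_pos hary _
    have hby2 : horner ary ys < ary ^ xs.length := by rw [hlen']; exact hby.2
    rw [horner_cons, horner_cons, ← hlen'] at heq
    have hxy : x = y := by
      by_contra hne
      rcases lt_or_gt_of_ne hne with h | h
      · have := block_lt _ _ _ _ _ hpx hbx.1 hbx.2 hby.1 h
        linarith
      · have := block_lt _ _ _ _ _ hpx hby.1 hby2 hbx.1 h
        linarith
    subst hxy
    have : horner ary xs = horner ary ys := by linarith
    rw [horner_inj ary hary xs ys (fun z hz => hina z (List.mem_cons_of_mem _ hz))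
      (fun z hz => hinb z (List.mem_cons_of_mem _ hz)) hlen' this]

theorem rotate_mul (l : List Int) (i : Nat) (hp : l.rotate i = l) :
    ∀ q r : Nat, l.rotate (i * q + r) = l.rotate r := by
  intro q
  induction q with
  | zero => simp
  | succ q ih =>
    intro r
    have : i * (q + 1) + r = i + (i * q + r) := by ring
    rw [this, ← List.rotate_rotate, hp, ih]

theorem rotate_mod (l : List Int) (i : Nat) (hi : 1 ≤ i) (hp : l.rotate i = l) (k : Nat) :
    l.rotate k = l.rotate (k % i) := by
  conv_lhs => rw [show k = i * (k / i) + k % i from (Nat.div_add_mod k i).symm]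
  exact rotate_mul l i hp _ _

theorem rot_step (ary : Int) (hary : 2 ≤ ary) (l : List Int) (hne : l ≠ [])
    (hin : InRange ary l) :
    PySem.Int.mod (ary * horner ary l + PySem.Int.floordiv (horner ary l) (ary ^ (l.length - 1)))
        (ary ^ l.length)
      = horner ary (l.rotate 1) := by
  obtain ⟨d, t, rfl⟩ := List.exists_cons_of_ne_nil hne
  have hary0 : (0:Int) < ary := by omega
  have hp : (0:Int) < ary ^ t.length := pow_pos hary0 _
  have hd := hin d (List.mem_cons_self ..)
  have hbt := horner_bounds ary hary0 t (fun x hx => hin x (List.mem_cons_of_mem _ hx))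
  have hlen : (d :: t).length - 1 = t.length := by simp
  have hdiv : PySem.Int.floordiv (horner ary (d :: t)) (ary ^ t.length) = d := by
    rw [PySem.Int.floordiv_eq_iff_of_pos hp]
    rw [horner_cons]
    constructor
    · nlinarith [hbt.1]
    · nlinarith [hbt.2]
  rw [hlen, hdiv]
  have hrot : (d :: t).rotate 1 = t ++ [d] := by
    rw [List.rotate_cons_succ, List.rotate_zero]
  rw [hrot]
  have hx : ary * horner ary (d :: t) + d
      = horner ary (t ++ [d]) + ary ^ (d :: t).length * d := by
    rw [horner_cons, horner_append_singleton]
    simp [pow_succ]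
    ring
  rw [hx]
  have hbtd : 0 ≤ horner ary (t ++ [d]) ∧ horner ary (t ++ [d]) < ary ^ (t ++ [d]).length := by
    refine horner_bounds ary hary0 _ ?_
    intro x hx
    rcases List.mem_append.1 hx with h | h
    · exact hin x (List.mem_cons_of_mem _ h)
    · simp at h; subst h; exact hd
  have hlen2 : (t ++ [d]).length = (d :: t).length := by simp
  have hM : (0:Int) < ary ^ (d :: t).length := pow_pos hary0 _
  rw [PySem.Int.mod_eq_emod_of_pos hM, Int.add_mul_emod_self_left,
    Int.emod_eq_of_lt hbtd.1 (by rw [← hlen2]; exact hbtd.2)]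

theorem least_of_eq (ary : Int) (l : List Int) (i : Nat) (hi1 : 1 ≤ i) (hp : l.rotate i = l)
    (hinv : ∀ j, 1 ≤ j → j < i → horner ary l < horner ary (l.rotate j)) : LeastRot ary l := by
  intro k hk1 hkn
  rw [rotate_mod l i hi1 hp k]
  rcases Nat.eq_zero_or_pos (k % i) with h0 | hpos
  · rw [h0]; simp
  · exact le_of_lt (hinv _ hpos (Nat.mod_lt _ (by omega)))

theorem inRange_rotate (ary : Int) (l : List Int) (hin : InRange ary l) (i : Nat) :
    InRange ary (l.rotate i) := fun x hx => hin x ((List.mem_rotate).1 hx)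

theorem rotate_eq_self_of_horner_eq (ary : Int) (hary : 0 < ary) (l : List Int)
    (hin : InRange ary l) (i : Nat) (heq : horner ary (l.rotate i) = horner ary l) :
    l.rotate i = l :=
  horner_inj ary hary _ _ (inRange_rotate ary l hin i) hin (List.length_rotate ..) heq

theorem nkLoop_spec (ary : Int) (hary : 2 ≤ ary) (l : List Int) (hne : l ≠ [])
    (hin : InRange ary l) :
    ∀ (f : Nat) (i : Nat), 1 ≤ i → i ≤ l.length → l.length ≤ i + f →
      (∀ j, 1 ≤ j → j < i → horner ary l < horner ary (l.rotate j)) →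
      (if_nk_loop ary (ary ^ (l.length - 1)) (ary ^ l.length) (horner ary l) f
          (horner ary (l.rotate i)) = true
        ↔ LeastRot ary l) := by
  have hary0 : (0:Int) < ary := by omega
  intro f
  induction f with
  | zero =>
    intro i hi1 hile hf hinv
    have hieq : i = l.length := by omega
    have hp : l.rotate i = l := by rw [hieq]; exact List.rotate_length l
    have hval : horner ary (l.rotate i) = horner ary l := by rw [hp]
    unfold if_nk_loop
    rw [if_pos hval]
    exact iff_of_true rfl (least_of_eq ary l i hi1 hp hinv)
  | succ f ihf =>
    intro i hi1 hile hf hinv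
    by_cases heq : horner ary (l.rotate i) = horner ary l
    · unfold if_nk_loop
      rw [if_pos heq]
      exact iff_of_true rfl
        (least_of_eq ary l i hi1 (rotate_eq_self_of_horner_eq ary hary0 l hin i heq) hinv)
    · by_cases hlt : horner ary (l.rotate i) < horner ary l
      · unfold if_nk_loop
        rw [if_neg heq, if_pos hlt]
        refine iff_of_false (by simp) ?_
        intro hL
        exact absurd (hL i hi1 hile) (not_le.2 hlt)
      · have hilt : i < l.length := by
          rcases Nat.lt_or_ge i l.length with h | h
          · exact h
          · exfalso
            have hieq : i = l.length := by omega
            exact heq (by rw [hieq, List.rotate_length])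
        have hr : PySem.Int.mod
            (ary * horner ary (l.rotate i)
              + PySem.Int.floordiv (horner ary (l.rotate i)) (ary ^ (l.length - 1)))
            (ary ^ l.length)
            = horner ary (l.rotate (i + 1)) := by
          have hne' : l.rotate i ≠ [] := by
            intro h
            exact hne (by simpa using congrArg List.length h)
          have h1 := rot_step ary hary (l.rotate i) hne' (inRange_rotate ary l hin i)
          rw [List.length_rotate, List.rotate_rotate] at h1
          exact h1
        have hstep : if_nk_loop ary (ary ^ (l.length - 1)) (ary ^ l.length) (horner ary l)
            (Nat.succ f) (horner ary (l.rotate i))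
            = if_nk_loop ary (ary ^ (l.length - 1)) (ary ^ l.length) (horner ary l) f
                (horner ary (l.rotate (i + 1))) := by
          conv_lhs => unfold if_nk_loop
          rw [if_neg heq, if_neg hlt, hr]
        rw [hstep]
        refine ihf (i + 1) (by omega) (by omega) (by omega) ?_
        intro j hj1 hji
        rcases Nat.lt_succ_iff_lt_or_eq.1 hji with h | h
        · exact hinv j hj1 h
        · subst h
          exact lt_of_le_of_ne (not_lt.1 hlt) (fun h' => heq h'.symm)

theorem if_nk_eq (ary : Int) (hary : 2 ≤ ary) (l : List Int) (hne : l ≠ [])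
    (hin : InRange ary l) :
    (if_nk l ary = true ↔ LeastRot ary l) := by
  have hlen : ¬ l.length = 0 := by simpa using hne
  have hpos : 1 ≤ l.length := by omega
  unfold if_nk
  rw [if_neg hlen]
  simp only [value1_eq_horner]
  rw [rot_step ary hary l hne hin]
  exact nkLoop_spec ary hary l hne hin l.length 1 (le_refl 1) hpos (by omega)
    (fun j hj1 hj => by omega)

theorem isLeastRotation_eq (ary : Int) (hary : 2 ≤ ary) (l : List Int) (hne : l ≠ [])
    (hin : InRange ary l) :
    (isLeastRotation l = true ↔ LeastRot ary l) := by
  have hary0 : (0:Int) < ary := by omega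
  have hbody : ∀ k : Int, 1 ≤ k → k < (l.length : Int) →
      (lexLe l (PySem.List.slice l (some k) none ++ PySem.List.slice l none (some k))
        = decide (horner ary l ≤ horner ary (l.rotate k.toNat))) := by
    intro k hk1 hkn
    rw [PySem.List.slice_from l (by omega), PySem.List.slice_to l (by omega),
      ← List.rotate_eq_drop_append_take (by omega)]
    exact lexLe_eq ary hary0 l _ hin (inRange_rotate ary l hin _)
      (List.length_rotate ..).symm
  unfold isLeastRotation
  rw [List.all_eq_true]
  constructor
  · intro hall k hk1 hkn
    rcases Nat.eq_or_lt_of_le hkn with h | h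
    · rw [h, List.rotate_length]
    · have hmem : (k : Int) ∈ PySem.List.pyRange 1 (PySem.List.len l) 1 := by
        rw [PySem.List.mem_pyRange_one]
        simp only [PySem.List.len_eq]
        omega
      have := hall _ hmem
      rw [hbody k (by exact_mod_cast hk1) (by exact_mod_cast h)] at this
      simpa using this
  · intro hL k hkmem
    rw [PySem.List.mem_pyRange_one] at hkmem
    simp only [PySem.List.len_eq] at hkmem
    rw [hbody k hkmem.1 hkmem.2]
    have := hL k.toNat (by omega) (by omega)
    simpa using this

theorem check_eq (ary : Int) (hary : 2 ≤ ary) (l : List Int) (hne : l ≠ [])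
    (hin : InRange ary l) : if_nk l ary = isLeastRotation l := by
  rw [Bool.eq_iff_iff, if_nk_eq ary hary l hne hin, isLeastRotation_eq ary hary l hne hin]

theorem outer_eq (body : List Int) (ary : Int) (hary : 2 ≤ ary) (hin : InRange ary body) :
    ∀ (tn : Nat) (t : Int), t.toNat ≤ tn → 1 ≤ t → t ≤ ary - 1 → ∀ (r : List Int),
      (if if_nk (body ++ [t]) ary then g_set_loopA body ary t (r ++ [t]) else r.reverse)
        = (g_set_loopB body (PySem.List.pyRange t 0 (-1)) r).reverse := by
  intro tn
  induction tn with
  | zero => intro t ht0 ht1 _ r; omega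
  | succ tn ih =>
    intro t ht0 ht1 hta r
    have hcons : PySem.List.pyRange t 0 (-1) = t :: PySem.List.pyRange (t - 1) 0 (-1) :=
      PySem.List.pyRange_neg_one_cons (by omega)
    rw [hcons]
    have hinr : InRange ary (body ++ [t]) := by
      intro x hx
      rcases List.mem_append.1 hx with h | h
      · exact hin x h
      · simp at h; subst h; omega
    have hne' : body ++ [t] ≠ [] := by simp
    have hchk := check_eq ary hary (body ++ [t]) hne' hinr
    show _ = (g_set_loopB body (t :: PySem.List.pyRange (t - 1) 0 (-1)) r).reverse
    unfold g_set_loopB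
    rw [← hchk]
    by_cases hc : if_nk (body ++ [t]) ary = true
    · rw [if_pos hc, if_pos hc]
      unfold g_set_loopA
      by_cases h1 : 1 < t
      · rw [dif_pos h1]
        exact ih (t - 1) (by omega) (by omega) (by omega) (r ++ [t])
      · rw [dif_neg h1]
        have hnil : PySem.List.pyRange (t - 1) 0 (-1) = [] :=
          PySem.List.pyRange_neg_one_eq_nil (by omega)
        rw [hnil]
        unfold g_set_loopB
        rfl
    · rw [if_neg hc, if_neg hc]

-- ===== VERDICT (by name: the statement is the Claim_ definition above) =====
theorem g_set_spec : Claim_equal_g_set := by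
  intro sequence ary _hdom hpre
  unfold Spec_g_set
  obtain ⟨hne, hrest⟩ := hpre
  obtain ⟨h, tl, rfl⟩ := List.exists_cons_of_ne_nil hne
  unfold g_set g_set_alt
  rw [PySem.List.pyGet?_zero_cons]
  dsimp only
  by_cases hh : h ≠ 0
  · rw [if_pos hh, if_pos hh]
  · rw [if_neg hh, if_neg hh]
    have hh0 : h = 0 := by omega
    rcases hrest with hbad | ⟨hary, hin⟩
    · exact absurd (by simp [hh0]) hbad
    · have hbody : PySem.List.slice (h :: tl) (some 1) none = tl := by
        rw [PySem.List.slice_from_one]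
        rfl
      rw [hbody]
      have := outer_eq tl ary hary (fun x hx => hin x (by simpa using hx)) (ary - 1).toNat (ary - 1)
        (le_refl _) (by omega) (le_refl _) []
      simpa using this
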